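-- pv_equiv track=rewrite | github.com/manuas2008/PythonSamplePrograms | PythonSamplePrograms/count_bits_upto_num.py | count_bits_upto_num
-- ===== SOURCE A (Python) =====
-- def count_bits_upto_num(num: int) -> list[int]:
--     result = []
--     for i in range(num + 1):
--         curr_num_bit_count = 0
--         curr_num = i
--         while curr_num > 0:
--             curr_num_bit_count += curr_num & 1
--             curr_num >>= 1
--         result.append(curr_num_bit_count)
--     return result
-- ===== SOURCE B (Python) =====
-- def count_bits_upto_num(num: int) -> list[int]:
--     # O(n) dynamic programming: the bit count of i is bits(i >> 1) plus i's low bit.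
--     result = []
--     for i in range(num + 1):
--         result.append(result[i >> 1] + (i & 1) if i else 0)
--     return result
-- ===== Notes on version B (the rewrite author's own statement) =====
-- stated objective: faster
-- what changed: Replaces the per-number bit-extraction while-loop with a one-pass dynamic program reusing result[i>>1] + (i&1), removing the inner O(log i) loop.
import Mathlib
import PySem

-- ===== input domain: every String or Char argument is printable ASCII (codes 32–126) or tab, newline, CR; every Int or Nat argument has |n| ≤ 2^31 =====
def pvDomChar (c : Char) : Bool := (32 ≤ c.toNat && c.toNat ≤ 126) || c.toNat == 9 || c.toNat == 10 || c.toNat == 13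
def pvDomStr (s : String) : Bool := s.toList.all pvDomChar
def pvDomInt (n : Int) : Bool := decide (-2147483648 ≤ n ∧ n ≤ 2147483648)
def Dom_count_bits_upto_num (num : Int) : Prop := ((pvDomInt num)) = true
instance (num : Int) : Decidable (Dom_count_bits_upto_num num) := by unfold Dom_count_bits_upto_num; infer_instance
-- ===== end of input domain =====

-- B replaces A's inner bit-extraction while-loop by the one-pass DP result[i>>1] + (i&1) (objective: faster).

-- ===== PORT A =====
-- A's inner while-loop: while curr_num > 0: count += curr_num & 1; curr_num >>= 1
lemma pvBitsDec (n : Int) (h : 0 < n) : (n >>> (1:Nat)).toNat < n.toNat := by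
  have := Int.shiftRight_eq_div_pow n 1
  simp at this; omega

def pvBits (n : Int) : Int :=
  if h : 0 < n then PySem.Int.band n 1 + pvBits (n >>> (1:Nat)) else 0
termination_by n.toNat
decreasing_by exact pvBitsDec n h

def count_bits_upto_num (num : Int) : List Int :=
  (PySem.List.pyRange 0 (num + 1)).foldl (fun result i => result ++ [pvBits i]) []

-- ===== PORT B =====
-- result[i >> 1] never raises in Source B (0 ≤ i>>1 < i ≤ len(result) for i > 0), so pyGetD is exact here.
def count_bits_upto_num_alt (num : Int) : List Int :=
  (PySem.List.pyRange 0 (num + 1)).foldl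
    (fun (result : List Int) (i : Int) =>
      result ++ [if i ≠ 0 then PySem.List.pyGetD result (i >>> (1:Nat)) 0 + PySem.Int.band i 1 else 0])
    []

-- ===== PRECONDITION & SPEC =====
def Spec_count_bits_upto_num (num : Int) (out : List Int) : Prop := out = count_bits_upto_num_alt num
instance (num : Int) (out : List Int) : Decidable (Spec_count_bits_upto_num num out) := by unfold Spec_count_bits_upto_num; infer_instance

-- ===== CLAIM (what is proved, stated in full; the proofs are below) =====
def Claim_equal_count_bits_upto_num : Prop := ∀ (num : Int), Dom_count_bits_upto_num num → Spec_count_bits_upto_num num (count_bits_upto_num num)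

-- ===== LEMMAS AND PROOFS =====

lemma pvShift_natCast (n : Nat) : ((n:Int) >>> (1:Nat)) = ((n / 2 : Nat) : Int) := by
  have := Int.shiftRight_eq_div_pow (n:Int) 1
  simp at this; omega

lemma pvBits_zero : pvBits 0 = 0 := by rw [pvBits]; simp

lemma pvBits_step (n : Nat) (h : 0 < n) :
    pvBits (n:Int) = pvBits ((n / 2 : Nat) : Int) + ((n % 2 : Nat) : Int) := by
  rw [pvBits]
  rw [dif_pos (by exact_mod_cast h)]
  rw [pvShift_natCast]
  have hb : PySem.Int.band (n:Int) 1 = ((n % 2 : Nat) : Int) := by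
    have := PySem.Int.band_natCast n 1
    simpa [Nat.and_one_is_mod] using this
  rw [hb]; ring

lemma pvFold_inv (n : Nat) :
    List.foldl
      (fun (result : List Int) (i : Int) =>
        result ++ [if i ≠ 0 then PySem.List.pyGetD result (i >>> (1:Nat)) 0 + PySem.Int.band i 1 else 0])
      [] (List.map (Nat.cast : Nat → Int) (List.range n))
    = List.map (fun k => pvBits ((k : Nat) : Int)) (List.range n) := by
  induction n with
  | zero => simp
  | succ m ih =>
    rw [List.range_succ, List.map_append, List.map_append, List.foldl_append, ih]
    by_cases hm : m = 0
    · subst hm; simp [pvBits_zero]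
    · have hm' : 0 < m := Nat.pos_of_ne_zero hm
      simp only [List.map_cons, List.map_nil, List.foldl_cons, List.foldl_nil]
      rw [if_pos (by exact_mod_cast hm)]
      rw [pvShift_natCast, PySem.List.pyGetD_natCast]
      have hlt : m / 2 < m := Nat.div_lt_self hm' (by omega)
      rw [PySem.List.getD_map_range (fun k => pvBits ((k : Nat) : Int)) m (m / 2) 0 hlt]
      have hb : PySem.Int.band (m:Int) 1 = ((m % 2 : Nat) : Int) := by
        have := PySem.Int.band_natCast m 1
        simpa [Nat.and_one_is_mod] using this
      rw [hb, ← pvBits_step m hm']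

-- ===== VERDICT (by name: the statement is the Claim_ definition above) =====
theorem count_bits_upto_num_spec : Claim_equal_count_bits_upto_num := by
  intro num _
  unfold Spec_count_bits_upto_num count_bits_upto_num count_bits_upto_num_alt
  by_cases h : 0 ≤ num + 1
  · have hcast : num + 1 = (((num + 1).toNat : Nat) : Int) := by omega
    rw [hcast, PySem.List.pyRange_zero_natCast]
    rw [PySem.List.foldl_append_singleton_eq_map, pvFold_inv]
    simp [List.map_map, Function.comp]
  · have : PySem.List.pyRange 0 (num + 1) = [] := by
      simp [PySem.List.pyRange]; omega
    rw [this]; rfl
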